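-- pv_equiv track=rewrite | github.com/c3er/txttrans | txttrans/xmllib/__init__.py | _contentarea
-- ===== SOURCE A (Python) =====
-- def _contentarea(lines):
--     startpos = 0
--     endpos = len(lines)
--     startfound = False
--     endfound = False
--     for i, line in enumerate(lines):
--         if not startfound and line.strip():
--             startpos = i
--             startfound = True
--         elif startfound and not endfound and not line.strip():
--             endpos = i
--             endfound = True
--     return startpos, endpos
-- ===== SOURCE B (Python) =====
-- def _contentarea(lines):
--     start = next((i for i, l in enumerate(lines) if l.strip()), None)
--     if start is None:
--         return 0, len(lines)
--     end = next((i for i, l in enumerate(lines) if i >= start and not l.strip()),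
--                len(lines))
--     return start, end
-- ===== Notes on version B (the rewrite author's own statement) =====
-- stated objective: simpler
-- what changed: Replaces the single stateful pass with two boolean flags by two targeted first-index searches (first non-blank line, then first blank line at or after it), with the defaults expressed directly.
import Mathlib
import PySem

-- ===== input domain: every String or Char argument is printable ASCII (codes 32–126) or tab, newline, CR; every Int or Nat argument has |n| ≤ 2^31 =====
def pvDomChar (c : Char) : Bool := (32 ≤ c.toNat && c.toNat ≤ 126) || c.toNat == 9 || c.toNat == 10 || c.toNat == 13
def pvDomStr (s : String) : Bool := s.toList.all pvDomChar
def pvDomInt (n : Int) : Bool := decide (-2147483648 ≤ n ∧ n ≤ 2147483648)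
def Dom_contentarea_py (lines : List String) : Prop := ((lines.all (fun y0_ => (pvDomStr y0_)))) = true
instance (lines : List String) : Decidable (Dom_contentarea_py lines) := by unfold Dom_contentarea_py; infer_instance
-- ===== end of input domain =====

-- B replaces A's single stateful flag-driven pass by two targeted first-index searches (simpler decomposition; return value only, no side effects).

-- ===== PORT A =====
-- the for-loop over enumerate(lines), carrying (startpos, endpos, startfound, endfound)
def pvLoopA : List String → Int → Int × Int × Bool × Bool → Int × Int × Bool × Bool
  | [], _, st => st
  | l :: ls, i, (sp, ep, sf, ef) =>
    pvLoopA ls (i + 1)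
      (if ¬sf ∧ PySem.Str.strip l ≠ "" then (i, ep, true, ef)
       else if sf ∧ ¬ef ∧ PySem.Str.strip l = "" then (sp, i, sf, true)
       else (sp, ep, sf, ef))

def contentarea_py (lines : List String) : Int × Int :=
  let st := pvLoopA lines 0 (0, (lines.length : Int), false, false)
  (st.1, st.2.1)

-- ===== PORT B =====
-- next((i for i, l in enumerate(lines) if l.strip()), None)
def pvFindNonblank : List String → Int → Option Int
  | [], _ => none
  | l :: ls, i => if PySem.Str.strip l ≠ "" then some i else pvFindNonblank ls (i + 1)

-- next((i for i, l in enumerate(lines) if i >= start and not l.strip()), len(lines))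
def pvFindBlankGe : List String → Int → Int → Option Int
  | [], _, _ => none
  | l :: ls, i, s =>
    if i ≥ s ∧ PySem.Str.strip l = "" then some i else pvFindBlankGe ls (i + 1) s

def contentarea_py_alt (lines : List String) : Int × Int :=
  match pvFindNonblank lines 0 with
  | none => (0, (lines.length : Int))
  | some s => (s, (pvFindBlankGe lines 0 s).getD (lines.length : Int))

-- ===== PRECONDITION & SPEC =====
def Spec_contentarea_py (lines : List String) (out : Int × Int) : Prop := out = contentarea_py_alt lines
instance (lines : List String) (out : Int × Int) : Decidable (Spec_contentarea_py lines out) := by unfold Spec_contentarea_py; infer_instance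

-- ===== CLAIM (what is proved, stated in full; the proofs are below) =====
def Claim_equal_contentarea_py : Prop := ∀ (lines : List String), Dom_contentarea_py lines → Spec_contentarea_py lines (contentarea_py lines)

-- ===== LEMMAS AND PROOFS =====

-- once both flags are set the loop state is frozen
theorem pvLoopA_frozen (ls : List String) (i sp ep : Int) :
    pvLoopA ls i (sp, ep, true, true) = (sp, ep, true, true) := by
  induction ls generalizing i with
  | nil => rfl
  | cons l ls ih => simp [pvLoopA, ih]

-- after the start is found at index s < i, the loop searches the first blank line
theorem pvLoopA_after_start (ls : List String) (i sp ep s : Int) (h : s < i) :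
    pvLoopA ls i (sp, ep, true, false) =
      match pvFindBlankGe ls i s with
      | none => (sp, ep, true, false)
      | some e => (sp, e, true, true) := by
  induction ls generalizing i with
  | nil => rfl
  | cons l ls ih =>
    by_cases hb : PySem.Str.strip l = ""
    · simp [pvLoopA, pvFindBlankGe, hb, le_of_lt h, pvLoopA_frozen]
    · simp [pvLoopA, pvFindBlankGe, hb, ih (i + 1) (by omega)]

theorem pvFindNonblank_ge (ls : List String) (i s : Int)
    (h : pvFindNonblank ls i = some s) : i ≤ s := by
  induction ls generalizing i with
  | nil => simp [pvFindNonblank] at h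
  | cons l ls ih =>
    by_cases hb : PySem.Str.strip l = ""
    · simp [pvFindNonblank, hb] at h
      have := ih (i + 1) h; omega
    · simp [pvFindNonblank, hb] at h; omega

-- full characterisation of the loop from the initial (no flags set) state
theorem pvLoopA_char (ls : List String) (i sp ep : Int) :
    pvLoopA ls i (sp, ep, false, false) =
      match pvFindNonblank ls i with
      | none => (sp, ep, false, false)
      | some s =>
        match pvFindBlankGe ls i s with
        | none => (s, ep, true, false)
        | some e => (s, e, true, true) := by
  induction ls generalizing i with
  | nil => rfl
  | cons l ls ih =>
    by_cases hb : PySem.Str.strip l = ""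
    · -- blank head: both scanners skip it
      have h1 : pvLoopA (l :: ls) i (sp, ep, false, false)
          = pvLoopA ls (i + 1) (sp, ep, false, false) := by simp [pvLoopA, hb]
      have h2 : pvFindNonblank (l :: ls) i = pvFindNonblank ls (i + 1) := by
        simp [pvFindNonblank, hb]
      rw [h1, ih (i + 1), h2]
      cases hfn : pvFindNonblank ls (i + 1) with
      | none => simp
      | some s =>
        have hge := pvFindNonblank_ge ls (i + 1) s hfn
        have hlt : ¬ (i ≥ s ∧ PySem.Str.strip l = "") := fun h => absurd h.1 (by omega)
        simp [pvFindBlankGe, hlt]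
    · -- non-blank head: start found here
      have h1 : pvLoopA (l :: ls) i (sp, ep, false, false)
          = pvLoopA ls (i + 1) (i, ep, true, false) := by simp [pvLoopA, hb]
      have h2 : pvFindNonblank (l :: ls) i = some i := by simp [pvFindNonblank, hb]
      have h3 : pvFindBlankGe (l :: ls) i i = pvFindBlankGe ls (i + 1) i := by
        simp [pvFindBlankGe, hb]
      rw [h1, pvLoopA_after_start ls (i + 1) i ep i (by omega), h2]
      simp only [h3]

-- ===== VERDICT (by name: the statement is the Claim_ definition above) =====
theorem contentarea_py_spec : Claim_equal_contentarea_py := by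
  intro lines _
  unfold Spec_contentarea_py contentarea_py contentarea_py_alt
  rw [pvLoopA_char]
  cases hfn : pvFindNonblank lines 0 with
  | none => simp
  | some s => cases hfb : pvFindBlankGe lines 0 s <;> simp [hfb]
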